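-- pv_equiv track=rewrite | github.com/Zippppo/Hyperbody-CVPR | data/spatial_adjacency.py | _normalize_ignored_class_indices
-- ===== SOURCE A (Python) =====
-- from typing import Iterable, Optional, Sequence, Tuple
--
-- def _normalize_ignored_class_indices(
--     num_classes: int,
--     ignored_class_indices: Optional[Iterable[int]],
-- ) -> Tuple[int, ...]:
--     """Validate and canonicalize ignored class indices."""
--     if ignored_class_indices is None:
--         return ()
--
--     normalized = []
--     for class_idx in ignored_class_indices:
--         class_idx = int(class_idx)
--         if class_idx < 0 or class_idx >= num_classes:
--             raise ValueError(
--                 f"Ignored class index {class_idx} is out of range for num_classes={num_classes}"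
--             )
--         normalized.append(class_idx)
--
--     return tuple(sorted(set(normalized)))
-- ===== SOURCE B (Python) =====
-- def _merge_unique(a, b):
--     out = []
--     i = j = 0
--     while i < len(a) and j < len(b):
--         if a[i] < b[j]:
--             out.append(a[i]); i += 1
--         elif b[j] < a[i]:
--             out.append(b[j]); j += 1
--         else:
--             out.append(a[i]); i += 1; j += 1
--     out.extend(a[i:])
--     out.extend(b[j:])
--     return out
--
--
-- def _merge_sort_unique(xs):
--     if len(xs) <= 1:
--         return xs
--     mid = len(xs) // 2
--     return _merge_unique(_merge_sort_unique(xs[:mid]), _merge_sort_unique(xs[mid:]))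
--
--
-- def _normalize_ignored_class_indices(num_classes, ignored_class_indices):
--     if ignored_class_indices is None:
--         return ()
--     normalized = []
--     for class_idx in ignored_class_indices:
--         class_idx = int(class_idx)
--         if class_idx < 0 or class_idx >= num_classes:
--             raise ValueError(
--                 f"Ignored class index {class_idx} is out of range for num_classes={num_classes}"
--             )
--         normalized.append(class_idx)
--     return tuple(_merge_sort_unique(normalized))
-- ===== Notes on version B (the rewrite author's own statement) =====
-- stated objective: alternative
-- what changed: Replaces tuple(sorted(set(normalized))) with a hand-written recursive merge sort whose merge step drops duplicates across the halves, producing the sorted unique tuple directly without building a set or calling sorted().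
import Mathlib
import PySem

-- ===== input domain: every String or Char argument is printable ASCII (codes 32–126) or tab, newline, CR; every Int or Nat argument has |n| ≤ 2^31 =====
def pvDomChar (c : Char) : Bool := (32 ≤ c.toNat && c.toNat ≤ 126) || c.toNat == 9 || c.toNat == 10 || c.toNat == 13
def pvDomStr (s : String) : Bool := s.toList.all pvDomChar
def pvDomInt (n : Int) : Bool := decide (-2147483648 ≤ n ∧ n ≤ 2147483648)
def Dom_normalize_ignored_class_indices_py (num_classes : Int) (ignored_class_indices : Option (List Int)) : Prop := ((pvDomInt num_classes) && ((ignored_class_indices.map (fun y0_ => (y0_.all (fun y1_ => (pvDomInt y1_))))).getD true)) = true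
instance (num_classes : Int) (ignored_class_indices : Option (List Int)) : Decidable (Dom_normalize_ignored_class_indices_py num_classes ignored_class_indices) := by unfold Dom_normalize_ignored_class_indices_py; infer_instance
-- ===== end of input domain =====

-- B replaces tuple(sorted(set(...))) with a hand-written merge sort whose merge drops
-- duplicates; equivalence proved on inputs where A does not raise.

-- ===== PORT A =====
-- The 'if … then acc' branch is where Python raises ValueError; Pre_ excludes those inputs,
-- so the guard only makes the fold total.
def normalize_ignored_class_indices_py (num_classes : Int) (ignored_class_indices : Option (List Int)) : List Int :=
  match ignored_class_indices with
  | none => []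
  | some xs =>
    let normalized := xs.foldl (fun acc class_idx =>
      if class_idx < 0 ∨ num_classes ≤ class_idx then acc else acc ++ [class_idx]) []
    PySem.List.sorted (PySem.Set.ofList normalized) (fun x => x) false

-- ===== PORT B =====
-- _merge_unique: the two-pointer while loop as the obvious structural recursion on (a, b).
def pvMergeUnique : List Int → List Int → List Int
  | [], b => b
  | x :: a, [] => x :: a
  | x :: a, y :: b =>
    if x < y then x :: pvMergeUnique a (y :: b)
    else if y < x then y :: pvMergeUnique (x :: a) b
    else x :: pvMergeUnique a b
termination_by a b => a.length + b.length

-- _merge_sort_unique: split at len // 2, recurse, merge.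
def pvMergeSortUnique (xs : List Int) : List Int :=
  if xs.length ≤ 1 then xs
  else
    let mid := xs.length / 2
    pvMergeUnique (pvMergeSortUnique (xs.take mid)) (pvMergeSortUnique (xs.drop mid))
termination_by xs.length
decreasing_by
  · simp only [List.length_take]; omega
  · simp only [List.length_drop]; omega

-- Same guard convention as in port A: the 'then acc' branch is Python's ValueError, excluded by Pre_.
def normalize_ignored_class_indices_py_alt (num_classes : Int) (ignored_class_indices : Option (List Int)) : List Int :=
  match ignored_class_indices with
  | none => []
  | some xs =>
    let normalized := xs.foldl (fun acc class_idx =>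
      if class_idx < 0 ∨ num_classes ≤ class_idx then acc else acc ++ [class_idx]) []
    pvMergeSortUnique normalized

-- ===== PRECONDITION & SPEC =====
-- Pre_ excludes exactly the inputs where A raises ValueError (some index < 0 or ≥ num_classes).
def Pre_normalize_ignored_class_indices_py (num_classes : Int) (ignored_class_indices : Option (List Int)) : Prop :=
  ∀ x ∈ ignored_class_indices.getD [], 0 ≤ x ∧ x < num_classes
instance (num_classes : Int) (ignored_class_indices : Option (List Int)) : Decidable (Pre_normalize_ignored_class_indices_py num_classes ignored_class_indices) := by unfold Pre_normalize_ignored_class_indices_py; infer_instance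

def pvWitness_normalize_ignored_class_indices_py : Int × Option (List Int) := (5, some [3, 1, 3, 0])

def Spec_normalize_ignored_class_indices_py (num_classes : Int) (ignored_class_indices : Option (List Int)) (out : List Int) : Prop := out = normalize_ignored_class_indices_py_alt num_classes ignored_class_indices
instance (num_classes : Int) (ignored_class_indices : Option (List Int)) (out : List Int) : Decidable (Spec_normalize_ignored_class_indices_py num_classes ignored_class_indices out) := by unfold Spec_normalize_ignored_class_indices_py; infer_instance

-- ===== CLAIM (what is proved, stated in full; the proofs are below) =====
def Claim_equal_normalize_ignored_class_indices_py : Prop := ∀ (num_classes : Int) (ignored_class_indices : Option (List Int)), Dom_normalize_ignored_class_indices_py num_classes ignored_class_indices → Pre_normalize_ignored_class_indices_py num_classes ignored_class_indices → Spec_normalize_ignored_class_indices_py num_classes ignored_class_indices (normalize_ignored_class_indices_py num_classes ignored_class_indices)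

-- ===== LEMMAS AND PROOFS =====

theorem pv_mem_mergeUnique (a b : List Int) (x : Int) :
    x ∈ pvMergeUnique a b ↔ x ∈ a ∨ x ∈ b := by
  fun_induction pvMergeUnique a b with
  | case1 b => simp
  | case2 y a => simp
  | case3 y a z b h ih => simp [ih]; tauto
  | case4 y a z b h h' ih => simp [ih]; tauto
  | case5 y a z b h h' ih =>
    have : y = z := by omega
    subst this
    simp [ih]; tauto

theorem pv_pairwise_mergeUnique (a b : List Int)
    (ha : a.Pairwise (· < ·)) (hb : b.Pairwise (· < ·)) :
    (pvMergeUnique a b).Pairwise (· < ·) := by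
  fun_induction pvMergeUnique a b with
  | case1 b => exact hb
  | case2 y a => exact ha
  | case3 y a z b h ih =>
    rw [List.pairwise_cons] at ha ⊢
    refine ⟨?_, ih ha.2 hb⟩
    intro w hw
    rcases (pv_mem_mergeUnique _ _ w).1 hw with hwa | hwb
    · exact ha.1 w hwa
    · rw [List.pairwise_cons] at hb
      rcases List.mem_cons.1 hwb with rfl | hwb'
      · exact h
      · exact lt_trans h (hb.1 w hwb')
  | case4 y a z b h h' ih =>
    rw [List.pairwise_cons] at hb ⊢
    refine ⟨?_, ih ha hb.2⟩
    intro w hw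
    rcases (pv_mem_mergeUnique _ _ w).1 hw with hwa | hwb
    · rw [List.pairwise_cons] at ha
      rcases List.mem_cons.1 hwa with rfl | hwa'
      · exact h'
      · exact lt_trans h' (ha.1 w hwa')
    · exact hb.1 w hwb
  | case5 y a z b h h' ih =>
    have hyz : y = z := by omega
    subst hyz
    rw [List.pairwise_cons] at ha hb ⊢
    refine ⟨?_, ih ha.2 hb.2⟩
    intro w hw
    rcases (pv_mem_mergeUnique _ _ w).1 hw with hwa | hwb
    · exact ha.1 w hwa
    · exact hb.1 w hwb

theorem pv_msort_spec (xs : List Int) :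
    (pvMergeSortUnique xs).Pairwise (· < ·) ∧ ∀ x, x ∈ pvMergeSortUnique xs ↔ x ∈ xs := by
  fun_induction pvMergeSortUnique xs with
  | case1 xs h =>
    match xs, h with
    | [], _ => simp
    | [y], _ => simp
  | case2 xs h mid ih1 ih2 =>
    refine ⟨pv_pairwise_mergeUnique _ _ ih1.1 ih2.1, ?_⟩
    intro x
    rw [pv_mem_mergeUnique, ih1.2, ih2.2]
    conv_rhs => rw [← List.take_append_drop mid xs]
    exact List.mem_append.symm

-- Under Pre_, the validation fold just appends every element.
theorem pv_foldl_guard_append (n : Int) (xs : List Int) (acc : List Int)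
    (h : ∀ x ∈ xs, 0 ≤ x ∧ x < n) :
    xs.foldl (fun acc x => if x < 0 ∨ n ≤ x then acc else acc ++ [x]) acc = acc ++ xs := by
  induction xs generalizing acc with
  | nil => simp
  | cons y ys ih =>
    have hy := h y (by simp)
    simp only [List.foldl_cons]
    rw [if_neg (by omega), ih _ (fun x hx => h x (by simp [hx]))]
    simp

theorem pv_main (n : Int) (xs : List Int) (h : ∀ x ∈ xs, 0 ≤ x ∧ x < n) :
    normalize_ignored_class_indices_py n (some xs)
      = normalize_ignored_class_indices_py_alt n (some xs) := by
  simp only [normalize_ignored_class_indices_py, normalize_ignored_class_indices_py_alt]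
  rw [pv_foldl_guard_append n xs [] h, List.nil_append]
  obtain ⟨hpair, hmem⟩ := pv_msort_spec xs
  have hnodup : (pvMergeSortUnique xs).Nodup := hpair.imp (fun h => ne_of_lt h)
  have hperm : (pvMergeSortUnique xs).Perm (PySem.Set.ofList xs) := by
    apply List.perm_of_nodup_nodup_toFinset_eq hnodup (PySem.Set.nodup_ofList xs)
    ext a
    simp [List.mem_toFinset, hmem, PySem.Set.mem_ofList]
  exact PySem.List.sorted_eq_of_perm_of_pairwise_lt _ _ (fun x => x) hperm hpair

-- ===== VERDICT (by name: the statement is the Claim_ definition above) =====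
theorem normalize_ignored_class_indices_py_spec : Claim_equal_normalize_ignored_class_indices_py := by
  intro n ig _ hpre
  unfold Spec_normalize_ignored_class_indices_py
  match ig with
  | none => rfl
  | some xs => exact pv_main n xs (by simpa [Pre_normalize_ignored_class_indices_py] using hpre)
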